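-- pv_equiv track=rewrite | github.com/dedalgr/Casino-management-system | Jackpot/games.py | get_first_3
-- ===== SOURCE A (Python) =====
-- def get_first_3(data, count=3):
--     all_bet = data.copy()
--     ips = []
--     bets = []
--     for i in all_bet:
--         ips.append(i)
--         bets.append(all_bet[i])
--     for i in range(len(all_bet) - count):
--         my_bet = min(bets)
--         ind = bets.index(my_bet)
--         del bets[ind]
--         my_ip = ips[ind]
--         del ips[ind]
--         del all_bet[my_ip]
--     return all_bet
-- ===== SOURCE B (Python) =====
-- def get_first_3(data, count=3):
--     items = list(data.items())
--     n = len(items)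
--     order = sorted(range(n), key=lambda i: (items[i][1], i))
--     kept = set(order[max(n - count, 0):])
--     return {k: v for i, (k, v) in enumerate(items) if i in kept}
-- ===== Notes on version B (the rewrite author's own statement) =====
-- stated objective: faster
-- what changed: A repeatedly scans the remaining values with min()/index() and deletes the minimum n-count times (quadratic repeated selection); B computes a single stable sort of the indices by (value, index), takes the kept index set in one slice, and builds the result in one filtering pass over the dict.
import Mathlib
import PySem

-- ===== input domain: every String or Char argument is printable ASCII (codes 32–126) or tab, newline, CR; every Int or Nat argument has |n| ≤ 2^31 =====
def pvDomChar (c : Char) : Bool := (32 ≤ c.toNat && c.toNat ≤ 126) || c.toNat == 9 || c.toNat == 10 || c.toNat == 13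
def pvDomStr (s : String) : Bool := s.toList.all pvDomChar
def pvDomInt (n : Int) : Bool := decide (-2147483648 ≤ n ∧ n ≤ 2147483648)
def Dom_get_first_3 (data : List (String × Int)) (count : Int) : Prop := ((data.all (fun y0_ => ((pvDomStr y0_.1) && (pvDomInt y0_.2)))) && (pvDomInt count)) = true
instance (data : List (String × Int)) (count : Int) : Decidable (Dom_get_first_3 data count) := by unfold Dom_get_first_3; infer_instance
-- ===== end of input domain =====

-- B replaces A's repeated min()/index()/delete selection loop by one stable sort of the
-- indices by (value, original index) plus a single filtering pass (faster, O(n log n) vs O(n^2)).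

-- ===== PORT A =====
-- loop body of A's main 'for i in range(len(all_bet) - count)' loop, named so the proofs can cite it;
-- state = (ips, bets, all_bet); the loop variable is ignored, as in A
def pvBodyA (st : List String × List Int × PySem.Dict String Int) (_ : Int) :
    List String × List Int × PySem.Dict String Int :=
  match PySem.List.min? st.2.1 (fun x => x) with          -- my_bet = min(bets); none = ValueError, unreachable under Pre_
  | none => st
  | some my_bet =>
    match PySem.List.index? st.2.1 my_bet with            -- ind = bets.index(my_bet); my_bet ∈ bets, so some
    | none => st
    | some ind =>
      let bets := st.2.1.eraseIdx ind                     -- del bets[ind]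
      match PySem.List.pyGet? st.1 (ind : Int) with       -- my_ip = ips[ind]; ind < len(ips), so some
      | none => (st.1, bets, st.2.2)
      | some my_ip => (st.1.eraseIdx ind, bets, st.2.2.erase my_ip)   -- del ips[ind]; del all_bet[my_ip]

def get_first_3 (data : List (String × Int)) (count : Int) : List (String × Int) :=
  let all_bet : PySem.Dict String Int := PySem.Dict.mk data        -- all_bet = data.copy()
  -- for i in all_bet: ips.append(i); bets.append(all_bet[i])  (i runs over the dict's own keys, so getD is exact)
  let ib := all_bet.keys.foldl
      (fun (st : List String × List Int) i => (st.1 ++ [i], st.2 ++ [all_bet.getD i 0])) ([], [])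
  let fin := (PySem.List.pyRange 0 ((PySem.Dict.size all_bet : Int) - count) 1).foldl
      pvBodyA (ib.1, ib.2, all_bet)
  fin.2.2.items

-- ===== PORT B =====
def get_first_3_alt (data : List (String × Int)) (count : Int) : List (String × Int) :=
  let items := data                                                 -- items = list(data.items())
  let n : Int := PySem.List.len items                               -- n = len(items)
  -- order = sorted(range(n), key=lambda i: (items[i][1], i))
  let order : List Int := PySem.List.sorted2 (PySem.List.pyRange 0 n 1)
      (fun i => (PySem.List.pyGetD items i ("", 0)).2) (fun i => i)
  -- kept = set(order[max(n - count, 0):])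
  let kept : PySem.Set Int := PySem.Set.ofList (PySem.List.slice order (some (max (n - count) 0)) none)
  -- {k: v for i, (k, v) in enumerate(items) if i in kept}
  ((PySem.List.enumerate items).foldl
      (fun (d : PySem.Dict String Int) p =>
        if PySem.Set.contains kept p.1 then d.insert p.2.1 p.2.2 else d)
      PySem.Dict.empty).items

-- ===== PRECONDITION & SPEC =====
-- Pre_ excludes count < 0, on which A's min() of an empty list raises ValueError after all entries have been
-- deleted, and assoc lists with duplicate keys, which do not represent a Python dict.
def Pre_get_first_3 (data : List (String × Int)) (count : Int) : Prop :=
  0 ≤ count ∧ (data.map Prod.fst).Nodup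
instance (data : List (String × Int)) (count : Int) : Decidable (Pre_get_first_3 data count) := by
  unfold Pre_get_first_3; infer_instance
def pvWitness_get_first_3 : (List (String × Int)) × Int := ([("alice", 5), ("bob", 2), ("eve", 9)], 2)

def Spec_get_first_3 (data : List (String × Int)) (count : Int) (out : List (String × Int)) : Prop := out = get_first_3_alt data count
instance (data : List (String × Int)) (count : Int) (out : List (String × Int)) : Decidable (Spec_get_first_3 data count out) := by unfold Spec_get_first_3; infer_instance

-- ===== CLAIM (what is proved, stated in full; the proofs are below) =====
def Claim_equal_get_first_3 : Prop := ∀ (data : List (String × Int)) (count : Int), Dom_get_first_3 data count → Pre_get_first_3 data count → Spec_get_first_3 data count (get_first_3 data count)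

-- ===== LEMMAS AND PROOFS =====

-- the strict lexicographic order (value, index) that B sorts by
def pvLex (f : Int → Int) (i j : Int) : Prop := f i < f j ∨ (f i = f j ∧ i < j)

-- one pass of A's selection loop, expressed on the current item list
def pvStep (L : List (String × Int)) : List (String × Int) :=
  match PySem.List.min? (L.map Prod.snd) (fun x => x) with
  | none => L
  | some m =>
    match PySem.List.index? (L.map Prod.snd) m with
    | none => L
    | some j => L.eraseIdx j

def pvF (data : List (String × Int)) (i : Int) : Int := (PySem.List.pyGetD data i ("", 0)).2

def pvOrder (data : List (String × Int)) : List Int :=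
  PySem.List.sorted2 (PySem.List.pyRange 0 (PySem.List.len data) 1) (pvF data) (fun i => i)

-- the survivors after m selection rounds, in original order
def pvKeep (data : List (String × Int)) (m : Nat) : List (Int × (String × Int)) :=
  (PySem.List.enumerate data).filter (fun p => decide (p.1 ∈ (pvOrder data).drop m))

theorem pv_insertBy_pairwise {α : Type} (bef : α → α → Bool)
    (htr : ∀ a b c, bef a b = true → bef b c = true → bef a c = true)
    (has : ∀ a b, bef a b = true → bef b a = false)
    (x : α) (acc : List α) (h : acc.Pairwise (fun a b => bef b a = false)) :
    (PySem.List.insertBy bef x acc).Pairwise (fun a b => bef b a = false) := by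
  induction acc with
  | nil => simp [PySem.List.insertBy]
  | cons y ys ih =>
    rw [show PySem.List.insertBy bef x (y :: ys)
        = if bef x y then x :: y :: ys else y :: PySem.List.insertBy bef x ys from rfl]
    rcases List.pairwise_cons.1 h with ⟨hy, hys⟩
    by_cases hxy : bef x y = true
    · simp only [hxy, if_true]
      refine List.pairwise_cons.2 ⟨?_, h⟩
      intro z hz
      rcases List.mem_cons.1 hz with rfl | hz
      · exact has _ _ hxy
      · -- bef z x = false: else bef z x and bef x y give bef z y, contradicting hy z
        by_contra hzx
        have : bef z y = true := htr _ _ _ (by revert hzx; cases bef z x <;> simp) hxy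
        rw [hy z hz] at this; exact Bool.false_ne_true this
    · have hxy' : bef x y = false := by revert hxy; cases bef x y <;> simp
      simp only [hxy', Bool.false_eq_true, if_false]
      refine List.pairwise_cons.2 ⟨?_, ih hys⟩
      intro z hz
      rcases (PySem.List.mem_insertBy bef x z ys).1 hz with rfl | hz
      · exact hxy'
      · exact hy z hz
theorem pv_foldl_insertBy_pairwise {α : Type} (bef : α → α → Bool)
    (htr : ∀ a b c, bef a b = true → bef b c = true → bef a c = true)
    (has : ∀ a b, bef a b = true → bef b a = false)
    (xs acc : List α) (h : acc.Pairwise (fun a b => bef b a = false)) :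
    (xs.foldl (fun acc x => PySem.List.insertBy bef x acc) acc).Pairwise (fun a b => bef b a = false) := by
  induction xs generalizing acc with
  | nil => exact h
  | cons x xs ih => exact ih _ (pv_insertBy_pairwise bef htr has x acc h)

theorem pv_sorted2_pairwise (data : List (String × Int)) :
    (pvOrder data).Pairwise (fun i j =>
      ((decide (pvF data j < pvF data i) || (!decide (pvF data i < pvF data j) && decide (j < i)))) = false) := by
  have := pv_foldl_insertBy_pairwise
    (fun a b => decide (pvF data a < pvF data b) || (!decide (pvF data b < pvF data a) && decide (a < b)))
    (by intro a b c hab hbc; simp only [Bool.or_eq_true, Bool.and_eq_true, Bool.not_eq_true',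
          decide_eq_true_eq, decide_eq_false_iff_not] at *; omega)
    (by intro a b hab; simp only [Bool.or_eq_true, Bool.and_eq_true, Bool.not_eq_true',
          decide_eq_true_eq, decide_eq_false_iff_not, Bool.or_eq_false_iff, Bool.and_eq_false_iff,
          Bool.not_eq_false', decide_eq_false_iff_not, decide_eq_true_eq] at *; constructor <;> omega)
    (PySem.List.pyRange 0 (PySem.List.len data) 1) [] (List.Pairwise.nil)
  exact this
theorem pvOrder_perm (data : List (String × Int)) :
    (pvOrder data).Perm (PySem.List.pyRange 0 (PySem.List.len data) 1) :=
  PySem.List.sorted2_perm _ _ _ _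
theorem pvOrder_nodup (data : List (String × Int)) : (pvOrder data).Nodup :=
  ((pvOrder_perm data).nodup_iff).2 (PySem.List.nodup_pyRange_one _ _)
theorem pvOrder_pairwise_lex (data : List (String × Int)) :
    (pvOrder data).Pairwise (pvLex (pvF data)) := by
  have h1 := pv_sorted2_pairwise data
  have h2 : (pvOrder data).Pairwise (· ≠ ·) := pvOrder_nodup data
  refine (h1.and h2).imp ?_
  rintro i j ⟨hb, hne⟩
  simp only [Bool.or_eq_false_iff, Bool.and_eq_false_iff, Bool.not_eq_false',
    decide_eq_false_iff_not, decide_eq_true_eq] at hb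
  unfold pvLex
  omega
theorem pv_mem_order (data : List (String × Int)) (i : Int) :
    i ∈ pvOrder data ↔ 0 ≤ i ∧ i < data.length := by
  rw [(pvOrder_perm data).mem_iff, PySem.List.mem_pyRange_one]
  simp [PySem.List.len]
theorem pv_first_loop (data : List (String × Int)) (hnd : (data.map Prod.fst).Nodup) :
    (PySem.Dict.mk data).keys.foldl
      (fun (st : List String × List Int) i => (st.1 ++ [i], st.2 ++ [(PySem.Dict.mk data).getD i 0])) ([], [])
      = (data.map Prod.fst, data.map Prod.snd) := by
  rw [PySem.List.foldl_prod_mk (f := fun s i => s ++ [i])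
      (g := fun s i => s ++ [(PySem.Dict.mk data).getD i 0])]
  rw [PySem.List.foldl_append_singleton_eq_self, PySem.List.foldl_append_singleton_eq_map]
  have hk : (PySem.Dict.mk data).keys = data.map Prod.fst := rfl
  rw [hk]
  refine Prod.ext (by simp) ?_
  simp only [List.map_map, List.nil_append]
  refine List.map_congr_left ?_
  intro p hp
  exact PySem.Dict.getD_of_mem_items (d := PySem.Dict.mk data) (k := p.1) (v := p.2) hp hnd 0
theorem pv_erase_eq_eraseIdx (L : List (String × Int)) (j : Nat) (hj : j < L.length)
    (hnd : (L.map Prod.fst).Nodup) :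
    (PySem.Dict.mk L).erase (L[j].1) = PySem.Dict.mk (L.eraseIdx j) := by
  have : ∀ (M : List (String × Int)) (j : Nat) (hj : j < M.length), (M.map Prod.fst).Nodup →
      M.filter (fun p => !(p.1 == M[j].1)) = M.eraseIdx j := by
    intro M
    induction M with
    | nil => intro j hj; simp at hj
    | cons a t ih =>
      intro j hj hnd
      simp only [List.map_cons, List.nodup_cons] at hnd
      cases j with
      | zero =>
        simp only [List.getElem_cons_zero, List.eraseIdx_zero, List.filter_cons, beq_self_eq_true,
          Bool.not_true, List.tail_cons, if_neg (by simp : ¬(false = true))]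
        rw [List.filter_eq_self.2 (by
          intro p hp
          have hne : p.1 ≠ a.1 := fun h => hnd.1 (h ▸ List.mem_map_of_mem hp)
          simp [hne])]
      | succ k =>
        have hk : k < t.length := by simpa using hj
        simp only [List.getElem_cons_succ, List.filter_cons, List.eraseIdx_cons_succ]
        have ha : ¬(a.1 = t[k].1) := by
          intro h
          exact hnd.1 (h ▸ List.mem_map_of_mem (List.getElem_mem hk))
        rw [if_pos (by simp [ha]), ih k hk hnd.2]
  unfold PySem.Dict.erase
  congr 1
  exact this L j hj hnd
theorem pv_body_eq (L : List (String × Int)) (hnd : (L.map Prod.fst).Nodup) (i : Int) :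
    pvBodyA (L.map Prod.fst, L.map Prod.snd, PySem.Dict.mk L) i
      = ((pvStep L).map Prod.fst, (pvStep L).map Prod.snd, PySem.Dict.mk (pvStep L)) := by
  unfold pvBodyA pvStep
  cases hmin : PySem.List.min? (L.map Prod.snd) (fun x => x) with
  | none => rfl
  | some m =>
    have hmem := PySem.List.min?_mem hmin
    cases hidx : PySem.List.index? (L.map Prod.snd) m with
    | none =>
      exact absurd hmem (List.idxOf?_eq_none_iff.1 hidx)
    | some j =>
      obtain ⟨hjlt, hget, -⟩ := List.idxOf?_eq_some_iff.1 hidx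
      have hjL : j < L.length := by simpa using hjlt
      simp only [hidx]
      rw [PySem.List.pyGet?_natCast]
      have hfst : (L.map Prod.fst)[j]? = some (L[j].1) := by
        simp [hjL]
      rw [hfst]
      simp only
      rw [List.eraseIdx_map, List.eraseIdx_map, pv_erase_eq_eraseIdx L j hjL hnd]
theorem pvStep_nodup (L : List (String × Int)) (hnd : (L.map Prod.fst).Nodup) :
    ((pvStep L).map Prod.fst).Nodup := by
  unfold pvStep
  cases h1 : PySem.List.min? (L.map Prod.snd) (fun x => x) with
  | none => exact hnd
  | some m =>
    cases h2 : PySem.List.index? (L.map Prod.snd) m with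
    | none => simp only [h2]; exact hnd
    | some j =>
      simp only [h2]
      exact List.Nodup.sublist ((List.eraseIdx_sublist L j).map Prod.fst) hnd
theorem pv_eraseIdx_append {α : Type} (A B : List α) (x : α) :
    (A ++ x :: B).eraseIdx A.length = A ++ B := by
  induction A with
  | nil => rfl
  | cons a t ih => simpa [List.eraseIdx_cons_succ] using ih

theorem pv_idxOf?_append (B1 B2 : List Int) (v : Int) (h : ∀ b ∈ B1, b ≠ v) :
    List.idxOf? v (B1 ++ v :: B2) = some B1.length := by
  refine List.idxOf?_eq_some_iff.2 ⟨by simp, ?_, ?_⟩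
  · rw [List.getElem_append_right (le_refl B1.length)]
    simp
  · intro k hk
    rw [List.getElem_append_left hk]
    exact h _ (List.getElem_mem _)

-- A's selection pass on a list split around its unique first minimum removes exactly that element
theorem pv_step_split (Tf Df : List (Int × (String × Int))) (e : Int × (String × Int))
    (hT : ∀ q ∈ Tf, e.2.2 < q.2.2) (hD : ∀ q ∈ Df, e.2.2 ≤ q.2.2) :
    pvStep ((Tf ++ e :: Df).map (·.2)) = (Tf ++ Df).map (·.2) := by
  unfold pvStep
  have hV : ((Tf ++ e :: Df).map (·.2)).map Prod.snd
      = Tf.map (fun q => q.2.2) ++ e.2.2 :: Df.map (fun q => q.2.2) := by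
    simp [Function.comp_def]
  cases hmin : PySem.List.min? (((Tf ++ e :: Df).map (·.2)).map Prod.snd) (fun x => x) with
  | none =>
    exfalso
    have := (PySem.List.min?_eq_none_iff _ _).1 hmin
    rw [hV] at this
    simp at this
  | some w =>
    have hwmem := PySem.List.min?_mem hmin
    have hwmin := PySem.List.min?_isMin hmin
    have hwe : w = e.2.2 := by
      have h1 : w ≤ e.2.2 := hwmin e.2.2 (by rw [hV]; simp)
      rw [hV] at hwmem
      rcases List.mem_append.1 hwmem with h | h
      · obtain ⟨q, hq, rfl⟩ := List.mem_map.1 h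
        exact absurd (hT q hq) (by omega)
      · rcases List.mem_cons.1 h with rfl | h
        · rfl
        · obtain ⟨q, hq, rfl⟩ := List.mem_map.1 h
          exact le_antisymm h1 (hD q hq)
    subst hwe
    have hidx : PySem.List.index? (((Tf ++ e :: Df).map (·.2)).map Prod.snd) e.2.2
        = some Tf.length := by
      show List.idxOf? e.2.2 _ = some Tf.length
      rw [hV]
      have := pv_idxOf?_append (Tf.map (fun q => q.2.2)) (Df.map (fun q => q.2.2)) e.2.2
        (by intro b hb
            obtain ⟨q, hq, rfl⟩ := List.mem_map.1 hb
            exact fun he => absurd (hT q hq) (by omega))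
      rw [this]
      simp
    simp only [hidx]
    have hmap : (Tf ++ e :: Df).map (fun q : Int × (String × Int) => q.2)
        = Tf.map (·.2) ++ e.2 :: Df.map (·.2) := by simp
    rw [hmap, show Tf.length = (Tf.map (·.2)).length by simp,
      pv_eraseIdx_append]
    simp

theorem pv_step_filter (data : List (String × Int)) (m : Nat) :
    pvStep ((pvKeep data m).map (·.2)) = (pvKeep data (m + 1)).map (·.2) := by
  by_cases hm : m < (pvOrder data).length
  · -- the element removed in this round is the one at position order[m]
    have hamem : (pvOrder data)[m] ∈ pvOrder data := List.getElem_mem hm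
    have hi := (pv_mem_order data ((pvOrder data)[m])).1 hamem
    set a : Int := (pvOrder data)[m] with ha
    set j : Nat := a.toNat with hjdef
    have hj : j < data.length := by omega
    have haj : (j : Int) = a := by omega
    have hElen : (PySem.List.enumerate data).length = data.length :=
      PySem.List.length_enumerate data 0
    have hjE : j < (PySem.List.enumerate data).length := by omega
    have hEj : (PySem.List.enumerate data)[j] = (a, data[j]) := by
      rw [PySem.List.getElem_enumerate data 0 j hjE]
      rw [show (0 : Int) + (j : Int) = a from by omega]
    have hsplit : PySem.List.enumerate data
        = (PySem.List.enumerate data).take j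
          ++ (a, data[j]) :: (PySem.List.enumerate data).drop (j + 1) := by
      rw [← hEj, ← List.drop_eq_getElem_cons hjE, List.take_append_drop]
    have hPW := PySem.List.pairwise_lt_enumerate data 0
    rw [hsplit, List.pairwise_append] at hPW
    obtain ⟨-, hpw2, hcross⟩ := hPW
    have hDgt : ∀ q ∈ (PySem.List.enumerate data).drop (j + 1), a < q.1 := by
      intro q hq
      exact (List.pairwise_cons.1 hpw2).1 q hq
    have hTlt : ∀ p ∈ (PySem.List.enumerate data).take j, p.1 < a := by
      intro p hp
      exact hcross p hp (a, data[j]) (List.mem_cons_self)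
    have hdropcons : (pvOrder data).drop m = a :: (pvOrder data).drop (m + 1) :=
      List.drop_eq_getElem_cons hm
    have hnodrop : a ∉ (pvOrder data).drop (m + 1) := by
      have h1 : ((pvOrder data).drop m).Nodup :=
        List.Nodup.sublist (List.drop_sublist m (pvOrder data)) (pvOrder_nodup data)
      rw [hdropcons] at h1
      exact (List.nodup_cons.1 h1).1
    have hLex : ∀ x ∈ (pvOrder data).drop (m + 1), pvLex (pvF data) a x := by
      have h1 : ((pvOrder data).drop m).Pairwise (pvLex (pvF data)) :=
        List.Pairwise.sublist (List.drop_sublist m (pvOrder data)) (pvOrder_pairwise_lex data)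
      rw [hdropcons] at h1
      exact (List.pairwise_cons.1 h1).1
    have hfE : ∀ p ∈ PySem.List.enumerate data, pvF data p.1 = p.2.2 := by
      intro p hp
      obtain ⟨k, hk, rfl⟩ := (PySem.List.mem_enumerate_iff data 0 p).1 hp
      simp [pvF, List.getD, List.getElem?_eq_getElem hk]
    have hfa : pvF data a = data[j].2 := by
      have := hfE _ (hsplit ▸ (List.mem_append.2 (Or.inr (List.mem_cons_self))))
      simpa using this
    -- split both filters around the removed element
    have hPe : decide (a ∈ (pvOrder data).drop m) = true := by
      simp [hdropcons]
    have hQe : decide (a ∈ (pvOrder data).drop (m + 1)) = false := by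
      simp [hnodrop]
    have hkeepm : pvKeep data m
        = ((PySem.List.enumerate data).take j).filter (fun p => decide (p.1 ∈ (pvOrder data).drop m))
          ++ (a, data[j])
          :: ((PySem.List.enumerate data).drop (j + 1)).filter (fun p => decide (p.1 ∈ (pvOrder data).drop m)) := by
      unfold pvKeep
      conv_lhs => rw [hsplit]
      rw [List.filter_append, List.filter_cons]
      simp only [hPe, if_true]
    have hTQ : ((PySem.List.enumerate data).take j).filter (fun p => decide (p.1 ∈ (pvOrder data).drop (m + 1)))
        = ((PySem.List.enumerate data).take j).filter (fun p => decide (p.1 ∈ (pvOrder data).drop m)) := by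
      refine List.filter_congr ?_
      intro p hp
      have hne : p.1 ≠ a := by have := hTlt p hp; omega
      simp [hdropcons, hne]
    have hDQ : ((PySem.List.enumerate data).drop (j + 1)).filter (fun p => decide (p.1 ∈ (pvOrder data).drop (m + 1)))
        = ((PySem.List.enumerate data).drop (j + 1)).filter (fun p => decide (p.1 ∈ (pvOrder data).drop m)) := by
      refine List.filter_congr ?_
      intro p hp
      have hne : p.1 ≠ a := by have := hDgt p hp; omega
      simp [hdropcons, hne]
    have hkeepm1 : pvKeep data (m + 1)
        = ((PySem.List.enumerate data).take j).filter (fun p => decide (p.1 ∈ (pvOrder data).drop m))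
          ++ ((PySem.List.enumerate data).drop (j + 1)).filter (fun p => decide (p.1 ∈ (pvOrder data).drop m)) := by
      unfold pvKeep
      conv_lhs => rw [hsplit]
      rw [List.filter_append, List.filter_cons]
      simp only [hQe, Bool.false_eq_true, if_false]
      rw [hTQ, hDQ]
    rw [hkeepm, hkeepm1]
    refine pv_step_split _ _ _ ?_ ?_
    · intro q hq
      rw [List.mem_filter] at hq
      have hq1 : q.1 < a := hTlt q hq.1
      have hqE : q ∈ PySem.List.enumerate data := by
        rw [hsplit]; exact List.mem_append.2 (Or.inl hq.1)
      have hqdrop : q.1 ∈ (pvOrder data).drop (m + 1) := by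
        have := of_decide_eq_true hq.2
        rw [hdropcons] at this
        rcases List.mem_cons.1 this with h | h
        · omega
        · exact h
      have hlex := hLex q.1 hqdrop
      rcases hlex with h | ⟨-, h⟩
      · rw [← hfE q hqE]; simpa [hfa] using h
      · omega
    · intro q hq
      rw [List.mem_filter] at hq
      have hqE : q ∈ PySem.List.enumerate data := by
        rw [hsplit]
        exact List.mem_append.2 (Or.inr (List.mem_cons.2 (Or.inr hq.1)))
      have hq1 : a < q.1 := hDgt q hq.1
      have hqdrop : q.1 ∈ (pvOrder data).drop (m + 1) := by
        have := of_decide_eq_true hq.2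
        rw [hdropcons] at this
        rcases List.mem_cons.1 this with h | h
        · omega
        · exact h
      have hlex := hLex q.1 hqdrop
      rw [← hfE q hqE]
      rcases hlex with h | ⟨h, -⟩
      · simpa [hfa] using le_of_lt h
      · simp [hfa, ← h]
  · -- nothing left to remove: both sides are empty
    have h1 : (pvOrder data).drop m = [] := List.drop_eq_nil_of_le (by omega)
    have h2 : (pvOrder data).drop (m + 1) = [] := List.drop_eq_nil_of_le (by omega)
    unfold pvKeep
    rw [h1, h2]
    simp only [List.not_mem_nil, decide_false, List.filter_false, List.map_nil]
    rfl
theorem pv_iterate_eq (data : List (String × Int)) (m : Nat) :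
    pvStep^[m] data = (pvKeep data m).map (·.2) := by
  induction m with
  | zero =>
    unfold pvKeep
    rw [Function.iterate_zero_apply, List.drop_zero]
    rw [List.filter_eq_self.2 ?_, PySem.List.map_snd_enumerate]
    intro p hp
    obtain ⟨k, hk, rfl⟩ := (PySem.List.mem_enumerate_iff data 0 p).1 hp
    simp only [decide_eq_true_eq]
    exact (pv_mem_order data _).2 (by constructor <;> [omega; simpa using hk])
  | succ m ih =>
    rw [Function.iterate_succ_apply', ih, pv_step_filter data m]
theorem pv_foldl_const {σ : Type} (l : List Int) (g : σ → Int → σ)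
    (hg : ∀ s i j, g s i = g s j) (s : σ) :
    l.foldl g s = (fun t => g t 0)^[l.length] s := by
  induction l generalizing s with
  | nil => rfl
  | cons a t ih =>
    rw [List.foldl_cons, List.length_cons, Function.iterate_succ_apply, ih (g s a), hg s a 0]

theorem pv_iter_triple (k : Nat) : ∀ (L : List (String × Int)), (L.map Prod.fst).Nodup →
    (fun st => pvBodyA st 0)^[k] (L.map Prod.fst, L.map Prod.snd, PySem.Dict.mk L)
      = ((pvStep^[k] L).map Prod.fst, (pvStep^[k] L).map Prod.snd, PySem.Dict.mk (pvStep^[k] L)) := by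
  induction k with
  | zero => intro L _; rfl
  | succ k ih =>
    intro L hnd
    rw [Function.iterate_succ_apply, Function.iterate_succ_apply]
    rw [pv_body_eq L hnd 0, ih (pvStep L) (pvStep_nodup L hnd)]
theorem pv_A_eq_iterate (data : List (String × Int)) (count : Int)
    (hnd : (data.map Prod.fst).Nodup) :
    get_first_3 data count = pvStep^[((data.length : Int) - count).toNat] data := by
  unfold get_first_3
  simp only
  rw [pv_first_loop data hnd]
  simp only [PySem.Dict.size]
  rw [pv_foldl_const _ pvBodyA (fun s i j => rfl),
    PySem.List.length_pyRange_one]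
  rw [show (PySem.Dict.mk data).items.length = data.length from rfl]
  rw [show ((data.length : Int) - count - 0).toNat = ((data.length : Int) - count).toNat by omega]
  rw [pv_iter_triple _ data hnd]
theorem pv_B_eq_keep (data : List (String × Int)) (count : Int)
    (hnd : (data.map Prod.fst).Nodup) :
    get_first_3_alt data count = (pvKeep data ((data.length : Int) - count).toNat).map (·.2) := by
  unfold get_first_3_alt
  simp only
  set n : Int := PySem.List.len data with hn
  set m : Nat := ((data.length : Int) - count).toNat with hm
  have hmax : (0:Int) ≤ max (n - count) 0 := le_max_right _ _
  rw [PySem.List.slice_from _ hmax]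
  have htn : (max (n - count) 0).toNat = m := by
    simp only [hn, hm, PySem.List.len]; omega
  rw [htn]
  have hord : pvOrder data
      = PySem.List.sorted2 (PySem.List.pyRange 0 n 1)
          (fun i => (PySem.List.pyGetD data i ("", 0)).2) (fun i => i) := rfl
  rw [← hord]
  have hdnd : ((pvOrder data).drop m).Nodup :=
    List.Nodup.sublist (List.drop_sublist m (pvOrder data)) (pvOrder_nodup data)
  rw [PySem.Set.ofList_eq_self_of_nodup _ hdnd]
  simp only [PySem.List.foldl_if_eq_foldl_filter]
  have hfc : (PySem.List.enumerate data).filter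
        (fun p => PySem.Set.contains ((pvOrder data).drop m) p.1) = pvKeep data m := by
    unfold pvKeep
    refine List.filter_congr ?_
    intro p _
    simp [PySem.Set.contains]
  rw [hfc]
  have hfresh : ∀ p ∈ pvKeep data m, (PySem.Dict.empty : PySem.Dict String Int).contains p.2.1 = false := by
    intro p _; exact PySem.Dict.contains_empty _
  have hknd : ((pvKeep data m).map (fun p => p.2.1)).Nodup := by
    have hsub : ((pvKeep data m).map (fun p => p.2.1)).Sublist
        ((PySem.List.enumerate data).map (fun p => p.2.1)) :=
      List.Sublist.map _ List.filter_sublist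
    have : (PySem.List.enumerate data).map (fun p => p.2.1) = data.map Prod.fst := by
      have := PySem.List.map_snd_enumerate data 0
      calc (PySem.List.enumerate data).map (fun p => p.2.1)
          = ((PySem.List.enumerate data).map (fun p => p.2)).map Prod.fst := by
            rw [List.map_map]; rfl
        _ = data.map Prod.fst := by rw [PySem.List.map_snd_enumerate]
    exact List.Nodup.sublist hsub (this ▸ hnd)
  rw [PySem.Dict.items_foldl_insert_fresh (pvKeep data m) (fun p => p.2.1) (fun p => p.2.2)
    PySem.Dict.empty hfresh hknd]
  simp only [PySem.Dict.empty, List.nil_append]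

-- ===== VERDICT (by name: the statement is the Claim_ definition above) =====
theorem get_first_3_spec : Claim_equal_get_first_3 := by
  intro data count _ hpre
  unfold Spec_get_first_3
  rw [pv_A_eq_iterate data count hpre.2, pv_B_eq_keep data count hpre.2,
    pv_iterate_eq data]
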